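-- pv_equiv track=rewrite | github.com/snpushpi/P_solving | 1007.py | domino
-- ===== SOURCE A (Python) =====
-- def domino(A,B):
--     if len(A)!=len(B):
--         return -1
--     marker_set = {A[0], B[0]}
--     for i in range(1,len(A)):
--         track_set = marker_set.copy()
--         for elt in track_set:
--             if elt not in {A[i], B[i]}:
--                 marker_set.remove(elt)
--     if len(marker_set)==0:
--         return -1
--     if len(marker_set)==1:
--         elt = marker_set.pop()
--         return min(len(A)-A.count(elt),len(B)-B.count(elt))
--     if len(marker_set)==2:
--         elt1= marker_set.pop()
--         elt2 = marker_set.pop()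
--         return min(len(A)-A.count(elt1), len(A)-A.count(elt2), len(B)-B.count(elt1), len(B)-B.count(elt2))
-- ===== SOURCE B (Python) =====
-- def domino(A, B):
--     if len(A) != len(B):
--         return -1
--     n = len(A)
--     candidates = [A[0]] if A[0] == B[0] else [A[0], B[0]]
--     ca, cb, both = {}, {}, {}
--     for a, b in zip(A, B):
--         ca[a] = ca.get(a, 0) + 1
--         cb[b] = cb.get(b, 0) + 1
--         if a == b:
--             both[a] = both.get(a, 0) + 1
--     best = -1
--     for v in candidates:
--         if ca.get(v, 0) + cb.get(v, 0) - both.get(v, 0) == n: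
--             swaps = n - max(ca.get(v, 0), cb.get(v, 0))
--             if best == -1 or swaps < best:
--                 best = swaps
--     return best
-- ===== Notes on version B (the rewrite author's own statement) =====
-- stated objective: alternative
-- what changed: Replaces the per-index set-copy intersection loop and the four list.count passes by a single pass that builds three frequency dictionaries (count in A, count in B, count of equal pairs) and checks each candidate by inclusion-exclusion ca[v]+cb[v]-both[v]==n, computing swaps as n-max(ca[v],cb[v]).
-- outside the precondition, e.g. on domino([], []): A raises IndexError, B raises IndexError
import Mathlib
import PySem

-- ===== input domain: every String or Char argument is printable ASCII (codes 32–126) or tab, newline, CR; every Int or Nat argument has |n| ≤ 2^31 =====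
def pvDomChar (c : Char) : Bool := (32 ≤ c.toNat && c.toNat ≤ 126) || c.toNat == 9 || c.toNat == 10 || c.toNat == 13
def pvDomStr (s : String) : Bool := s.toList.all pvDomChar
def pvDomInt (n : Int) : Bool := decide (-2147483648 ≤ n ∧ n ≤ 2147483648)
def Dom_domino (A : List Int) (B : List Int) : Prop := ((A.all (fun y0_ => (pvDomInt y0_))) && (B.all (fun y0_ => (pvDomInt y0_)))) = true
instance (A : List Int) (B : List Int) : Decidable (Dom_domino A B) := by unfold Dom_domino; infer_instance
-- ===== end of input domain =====

-- B replaces A's per-index set-copy intersection loop and four list.count passes by one pass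
-- building three frequency dicts and an inclusion-exclusion check per candidate (alternative, same cost).

-- ===== PORT A =====
def domino (A : List Int) (B : List Int) : Int :=
  if (A.length : Int) ≠ (B.length : Int) then -1
  else
    match PySem.List.pyGet? A 0, PySem.List.pyGet? B 0 with
    | some a0, some b0 =>
      -- for i in range(1, len(A)): for elt in marker_set.copy(): if elt not in {A[i],B[i]}: marker_set.remove(elt)
      -- pyGetD is exact here (1 ≤ i < len); set.remove never misses (elt comes from the copy and only
      -- other elements were removed before it), so Set.discard is exact for it
      let marker :=
        (PySem.List.pyRange 1 (A.length : Int) 1).foldl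
          (fun ms i =>
            ms.foldl
              (fun ms' elt =>
                if ¬ (elt = PySem.List.pyGetD A i 0 ∨ elt = PySem.List.pyGetD B i 0) then
                  PySem.Set.discard ms' elt
                else ms') ms)
          (PySem.Set.ofList [a0, b0])
      if PySem.Set.len marker = 0 then -1
      else if PySem.Set.len marker = 1 then
        match marker with
        | elt :: _ =>
            min ((A.length : Int) - (PySem.List.count A elt : Int))
                ((B.length : Int) - (PySem.List.count B elt : Int))
        | [] => -1   -- unreachable (len marker = 1)
      else
        -- len(marker_set) == 2; the min of the four values is symmetric in the two pops,
        -- so consuming the Set in list order is exact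
        match marker with
        | elt1 :: elt2 :: _ =>
            min (min (min ((A.length : Int) - (PySem.List.count A elt1 : Int))
                         ((A.length : Int) - (PySem.List.count A elt2 : Int)))
                    ((B.length : Int) - (PySem.List.count B elt1 : Int)))
                ((B.length : Int) - (PySem.List.count B elt2 : Int))
        | _ => -1    -- unreachable (len marker = 2)
    | _, _ => -1     -- unreachable under Pre_: Python raises IndexError on A[0]

-- ===== PORT B =====
def domino_alt (A : List Int) (B : List Int) : Int :=
  if (A.length : Int) ≠ (B.length : Int) then -1
  else
    match PySem.List.pyGet? A 0 with
    | none => -1     -- unreachable under Pre_: Python raises IndexError on A[0]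
    | some a0 =>
      match PySem.List.pyGet? B 0 with
      | none => -1   -- unreachable under Pre_ (same length as A)
      | some b0 =>
      let n : Int := (A.length : Int)
      let candidates := if a0 = b0 then [a0] else [a0, b0]
      let cs :=
        (A.zip B).foldl
          (fun (s : PySem.Dict Int Int × PySem.Dict Int Int × PySem.Dict Int Int) p =>
            (s.1.insert p.1 (s.1.getD p.1 0 + 1),
             s.2.1.insert p.2 (s.2.1.getD p.2 0 + 1),
             if p.1 = p.2 then s.2.2.insert p.1 (s.2.2.getD p.1 0 + 1) else s.2.2))
          (PySem.Dict.empty, PySem.Dict.empty, PySem.Dict.empty)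
      candidates.foldl
        (fun best v =>
          if cs.1.getD v 0 + cs.2.1.getD v 0 - cs.2.2.getD v 0 = n then
            let swaps := n - max (cs.1.getD v 0) (cs.2.1.getD v 0)
            if best = -1 ∨ swaps < best then swaps else best
          else best)
        (-1)

-- ===== PRECONDITION & SPEC =====
-- Pre_ excludes only ([], []), where A (and B) raise IndexError on A[0].
def Pre_domino (A : List Int) (B : List Int) : Prop := ¬ (A = [] ∧ B = [])
instance (A : List Int) (B : List Int) : Decidable (Pre_domino A B) := by unfold Pre_domino; infer_instance
def pvWitness_domino : List Int × List Int := ([1, 2], [2, 1])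

def Spec_domino (A : List Int) (B : List Int) (out : Int) : Prop := out = domino_alt A B
instance (A : List Int) (B : List Int) (out : Int) : Decidable (Spec_domino A B out) := by unfold Spec_domino; infer_instance

-- ===== CLAIM (what is proved, stated in full; the proofs are below) =====
def Claim_equal_domino : Prop := ∀ (A : List Int) (B : List Int), Dom_domino A B → Pre_domino A B → Spec_domino A B (domino A B)

-- ===== LEMMAS AND PROOFS =====

-- removing x by discard from a Nodup list where it occurs once
lemma discard_middle (pre rest : List Int) (x : Int) (h : (pre ++ x :: rest).Nodup) :
    PySem.Set.discard (pre ++ x :: rest) x = pre ++ rest := by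
  have h' := List.nodup_middle.mp h
  have hx : x ∉ pre ++ rest := (List.nodup_cons.mp h').1
  simp at hx
  simp [PySem.Set.discard, List.filter_append]
  rw [List.filter_eq_self.mpr (fun y hy => by simp; exact fun e => hx.1 (e ▸ hy)),
      List.filter_eq_self.mpr (fun y hy => by simp; exact fun e => hx.2 (e ▸ hy))]

-- inner loop of A: iterating a copy and discarding failing elements = filter
lemma inner_fold (C : Int → Prop) [inst : DecidablePred C] :
    ∀ (m pre : List Int), (pre ++ m).Nodup →
      m.foldl (fun ms' elt => if ¬ C elt then PySem.Set.discard ms' elt else ms') (pre ++ m)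
        = pre ++ m.filter (fun e => decide (C e)) := by
  intro m
  induction m with
  | nil => intro pre h; simp
  | cons x rest ih =>
    intro pre h
    rw [List.foldl_cons]
    by_cases hx : C x
    · have heq : pre ++ x :: rest = (pre ++ [x]) ++ rest := by simp
      rw [if_neg (by simpa using hx), heq, ih (pre ++ [x]) (by rw [← heq]; exact h)]
      simp [hx]
    · have hnd : (pre ++ rest).Nodup := (List.nodup_cons.mp (List.nodup_middle.mp h)).2
      rw [if_pos (by simpa using hx), discard_middle pre rest x h, ih pre hnd]
      simp [hx]

-- outer loop of A: the surviving markers are exactly those passing every index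
lemma outer_fold (f g : Int → Int) :
    ∀ (L : List Int) (init : List Int), init.Nodup →
      L.foldl
        (fun ms i =>
          ms.foldl
            (fun ms' elt => if ¬ (elt = f i ∨ elt = g i) then PySem.Set.discard ms' elt else ms') ms)
        init
      = init.filter (fun e => decide (∀ i ∈ L, e = f i ∨ e = g i)) := by
  intro L
  induction L with
  | nil => intro init h; simp
  | cons j L ih =>
    intro init h
    rw [List.foldl_cons]
    have hstep := inner_fold (fun e => e = f j ∨ e = g j) init [] (by simpa using h)
    simp only [List.nil_append] at hstep
    rw [hstep, ih _ (h.filter _), List.filter_filter]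
    apply List.filter_congr
    intro e _
    simp
    rw [Bool.and_comm]

lemma countP_add_countP (p1 p2 : (Int × Int) → Bool) (l : List (Int × Int)) :
    l.countP p1 + l.countP p2 = l.countP (fun x => p1 x || p2 x) + l.countP (fun x => p1 x && p2 x) := by
  induction l with
  | nil => simp
  | cons a t ih =>
    by_cases h1 : p1 a <;> by_cases h2 : p2 a <;> simp [h1, h2] <;> omega

-- the three dicts built by B's single pass, read back as counts over the zip
lemma counts_fold (l : List (Int × Int)) (v : Int) :
    ((l.foldl
      (fun (s : PySem.Dict Int Int × PySem.Dict Int Int × PySem.Dict Int Int) p =>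
        (s.1.insert p.1 (s.1.getD p.1 0 + 1),
         s.2.1.insert p.2 (s.2.1.getD p.2 0 + 1),
         if p.1 = p.2 then s.2.2.insert p.1 (s.2.2.getD p.1 0 + 1) else s.2.2))
      (PySem.Dict.empty, PySem.Dict.empty, PySem.Dict.empty)) |>
      (fun cs => cs.1.getD v 0 = ((l.map Prod.fst).count v : Int)
        ∧ cs.2.1.getD v 0 = ((l.map Prod.snd).count v : Int)
        ∧ cs.2.2.getD v 0 = (((l.filter (fun p => decide (p.1 = p.2))).map Prod.fst).count v : Int))) := by
  have split3 : ∀ (l : List (Int × Int)) (s : PySem.Dict Int Int × PySem.Dict Int Int × PySem.Dict Int Int),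
      l.foldl
        (fun s p =>
          (s.1.insert p.1 (s.1.getD p.1 0 + 1),
           s.2.1.insert p.2 (s.2.1.getD p.2 0 + 1),
           if p.1 = p.2 then s.2.2.insert p.1 (s.2.2.getD p.1 0 + 1) else s.2.2)) s
      = (l.foldl (fun d p => d.insert p.1 (d.getD p.1 0 + 1)) s.1,
         l.foldl (fun d p => d.insert p.2 (d.getD p.2 0 + 1)) s.2.1,
         l.foldl (fun d p => if p.1 = p.2 then d.insert p.1 (d.getD p.1 0 + 1) else d) s.2.2) := by
    intro l
    induction l with
    | nil => intro s; rfl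
    | cons p t ih => intro s; rw [List.foldl_cons, ih]; rfl
  rw [split3]
  dsimp only
  refine ⟨?_, ?_, ?_⟩
  · rw [← List.foldl_map (f := Prod.fst) (g := fun d x => PySem.Dict.insert d x (d.getD x 0 + 1))]
    simp [PySem.Dict.getD_foldl_insert_add_one]
  · rw [← List.foldl_map (f := Prod.snd) (g := fun d x => PySem.Dict.insert d x (d.getD x 0 + 1))]
    simp [PySem.Dict.getD_foldl_insert_add_one]
  · rw [PySem.List.foldl_ite_eq_foldl_filter (p := fun p : Int × Int => p.1 = p.2)
        (f := fun (d : PySem.Dict Int Int) (p : Int × Int) => d.insert p.1 (d.getD p.1 0 + 1))]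
    rw [← List.foldl_map (f := Prod.fst) (g := fun d x => PySem.Dict.insert d x (d.getD x 0 + 1))]
    simp [PySem.Dict.getD_foldl_insert_add_one]

-- inclusion-exclusion: B's candidate test says "v occurs in every pair"
lemma incl_excl (l : List (Int × Int)) (v : Int) :
    ((l.map Prod.fst).count v : Int) + ((l.map Prod.snd).count v : Int)
      - (((l.filter (fun p => decide (p.1 = p.2))).map Prod.fst).count v : Int) = (l.length : Int)
    ↔ ∀ p ∈ l, v = p.1 ∨ v = p.2 := by
  have h1 : (l.map Prod.fst).count v = l.countP (fun p => p.1 == v) := by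
    rw [List.count_eq_countP, List.countP_map]; rfl
  have h2 : (l.map Prod.snd).count v = l.countP (fun p => p.2 == v) := by
    rw [List.count_eq_countP, List.countP_map]; rfl
  have h3 : ((l.filter (fun p => decide (p.1 = p.2))).map Prod.fst).count v
      = l.countP (fun p => (p.1 == v) && (p.2 == v)) := by
    rw [List.count_eq_countP, List.countP_map, List.countP_filter]
    apply List.countP_congr
    intro p _
    by_cases hv : p.1 = v <;> by_cases he : p.1 = p.2 <;> simp [hv, he] <;> omega
  have hadd := countP_add_countP (fun p => p.1 == v) (fun p => p.2 == v) l
  have hle := List.countP_le_length (p := fun p : Int × Int => (p.1 == v) || (p.2 == v)) (l := l)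
  have hiff : l.countP (fun p => (p.1 == v) || (p.2 == v)) = l.length
      ↔ ∀ p ∈ l, v = p.1 ∨ v = p.2 := by
    rw [List.countP_eq_length]
    constructor
    · intro h p hp; have := h p hp; simp at this; omega
    · intro h p hp; have := h p hp; simp; omega
  rw [h1, h2, h3]
  constructor
  · intro h; apply hiff.mp; omega
  · intro h; have := hiff.mpr h; omega

-- A's index loop condition, read over the zip of the tails
lemma range_pairs (a0 b0 : Int) (A' B' : List Int) (hl : A'.length = B'.length) (e : Int) :
    (∀ i ∈ PySem.List.pyRange 1 (((a0 :: A').length : Nat) : Int) 1,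
        e = PySem.List.pyGetD (a0 :: A') i 0 ∨ e = PySem.List.pyGetD (b0 :: B') i 0)
    ↔ ∀ p ∈ A'.zip B', e = p.1 ∨ e = p.2 := by
  have hA : (PySem.List.pyRange 1 (((a0 :: A').length : Nat) : Int) 1).map
      (fun j => PySem.List.pyGetD (a0 :: A') j 0) = A' := by
    have := PySem.List.map_pyGetD_pyRange (a0 :: A') 0 (a := 1) (by norm_num)
    simpa using this
  have hB : (PySem.List.pyRange 1 (((a0 :: A').length : Nat) : Int) 1).map
      (fun j => PySem.List.pyGetD (b0 :: B') j 0) = B' := by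
    have := PySem.List.map_pyGetD_pyRange (b0 :: B') 0 (a := 1) (by norm_num)
    simp at this
    simpa [hl] using this
  conv_rhs => rw [← hA, ← hB, List.zip_map']
  rw [List.forall_mem_map]

-- ===== VERDICT (by name: the statement is the Claim_ definition above) =====
theorem domino_spec : Claim_equal_domino := by
  unfold Claim_equal_domino Spec_domino
  intro A B _ hpre
  by_cases hlen : (A.length : Int) = (B.length : Int)
  case neg =>
    unfold domino domino_alt
    rw [if_pos hlen, if_pos hlen]
  case pos =>
    have hANil : A ≠ [] := by
      rintro rfl
      simp at hlen
      exact hpre ⟨rfl, List.length_eq_zero_iff.mp (by exact_mod_cast hlen.symm)⟩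
    obtain ⟨a0, A', rfl⟩ := List.exists_cons_of_ne_nil hANil
    have hBNil : B ≠ [] := by rintro rfl; simp at hlen; omega
    obtain ⟨b0, B', rfl⟩ := List.exists_cons_of_ne_nil hBNil
    have hl : A'.length = B'.length := by
      have : (a0 :: A').length = (b0 :: B').length := by exact_mod_cast hlen
      simpa using this
    unfold domino domino_alt
    rw [if_neg (by simpa using hlen), if_neg (by simpa using hlen)]
    have hga : PySem.List.pyGet? (a0 :: A') (0 : Int) = some a0 := by
      simp [PySem.List.pyGet?, PySem.List.pyIdx?]
    have hgb : PySem.List.pyGet? (b0 :: B') (0 : Int) = some b0 := by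
      simp [PySem.List.pyGet?, PySem.List.pyIdx?]
    rw [hga, hgb]
    dsimp only
    rw [outer_fold (fun i => PySem.List.pyGetD (a0 :: A') i 0) (fun i => PySem.List.pyGetD (b0 :: B') i 0) _ _ (PySem.Set.nodup_ofList _)]
    have hQ : ∀ e, decide (∀ i ∈ PySem.List.pyRange 1 (((a0 :: A').length : Nat) : Int) 1,
          e = PySem.List.pyGetD (a0 :: A') i 0 ∨ e = PySem.List.pyGetD (b0 :: B') i 0)
        = decide (∀ p ∈ A'.zip B', e = p.1 ∨ e = p.2) :=
      fun e => decide_eq_decide.mpr (range_pairs a0 b0 A' B' hl e)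
    simp only [hQ]
    obtain ⟨hca, hcb, hcc⟩ := counts_fold ((a0 :: A').zip (b0 :: B')) a0
    obtain ⟨hca', hcb', hcc'⟩ := counts_fold ((a0 :: A').zip (b0 :: B')) b0
    have hZc : (a0 :: A').zip (b0 :: B') = (a0, b0) :: A'.zip B' := rfl
    have hZlen : ((((a0 :: A').zip (b0 :: B')).length : Nat) : Int) = (((a0 :: A').length : Nat) : Int) := by
      simp [List.length_zip, hl]
    have hfst : ((a0 :: A').zip (b0 :: B')).map Prod.fst = a0 :: A' :=
      List.map_fst_zip (by simp [hl])
    have hsnd : ((a0 :: A').zip (b0 :: B')).map Prod.snd = b0 :: B' :=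
      List.map_snd_zip (by simp [hl])
    have keya : ((((a0 :: A').zip (b0 :: B')).map Prod.fst).count a0 : Int)
          + ((((a0 :: A').zip (b0 :: B')).map Prod.snd).count a0 : Int)
          - (((((a0 :: A').zip (b0 :: B')).filter (fun p => decide (p.1 = p.2))).map Prod.fst).count a0 : Int)
          = (((a0 :: A').length : Nat) : Int)
        ↔ (∀ p ∈ A'.zip B', a0 = p.1 ∨ a0 = p.2) := by
      rw [← hZlen, incl_excl, hZc, List.forall_mem_cons]
      simp
    have keyb : ((((a0 :: A').zip (b0 :: B')).map Prod.fst).count b0 : Int)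
          + ((((a0 :: A').zip (b0 :: B')).map Prod.snd).count b0 : Int)
          - (((((a0 :: A').zip (b0 :: B')).filter (fun p => decide (p.1 = p.2))).map Prod.fst).count b0 : Int)
          = (((a0 :: A').length : Nat) : Int)
        ↔ (∀ p ∈ A'.zip B', b0 = p.1 ∨ b0 = p.2) := by
      rw [← hZlen, incl_excl, hZc, List.forall_mem_cons]
      simp
    have hcntA : ∀ e, PySem.List.count (a0 :: A') e = List.count e (a0 :: A') := fun e => PySem.List.count_eq _ _
    have hcntB : ∀ e, PySem.List.count (b0 :: B') e = List.count e (b0 :: B') := fun e => PySem.List.count_eq _ _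
    have hleA : ∀ e, List.count e (a0 :: A') ≤ (a0 :: A').length := fun e => List.count_le_length
    have hleB : ∀ e, List.count e (b0 :: B') ≤ (b0 :: B').length := fun e => List.count_le_length
    have hlen' : (b0 :: B').length = (a0 :: A').length := by simp [hl]
    by_cases hab : a0 = b0
    · subst hab
      have hof : PySem.Set.ofList [a0, a0] = [a0] := by simp [PySem.Set.ofList, PySem.Set.add]
      rw [hof, if_pos rfl]
      by_cases hQa : ∀ p ∈ A'.zip B', a0 = p.1 ∨ a0 = p.2
      · have hd : decide (∀ p ∈ A'.zip B', a0 = p.1 ∨ a0 = p.2) = true := decide_eq_true hQa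
        simp only [List.filter_cons, List.filter_nil, hd, if_true, List.foldl_cons,
          List.foldl_nil, hca, hcb, hcc, if_pos (keya.mpr hQa)]
        simp only [hfst, hsnd, hcntA, hcntB, hlen']
        norm_num [PySem.Set.len]
        omega
      · have hd : decide (∀ p ∈ A'.zip B', a0 = p.1 ∨ a0 = p.2) = false := decide_eq_false hQa
        simp only [List.filter_cons, List.filter_nil, hd, List.foldl_cons,
          List.foldl_nil, hca, hcb, hcc, if_neg (fun hc => hQa (keya.mp hc))]
        simp [PySem.Set.len]
    · have hof : PySem.Set.ofList [a0, b0] = [a0, b0] := by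
        simp [PySem.Set.ofList, PySem.Set.add, Ne.symm hab]
      rw [hof, if_neg hab]
      have l1 := hleA a0
      have l2 := hleA b0
      have l3 := hleB a0
      have l4 := hleB b0
      have e1 : List.count a0 (a0 :: A') = List.count a0 A' + 1 := by simp
      have e2 : List.count b0 (a0 :: A') = List.count b0 A' := by simp [List.count_cons]; omega
      have e3 : List.count a0 (b0 :: B') = List.count a0 B' := by simp [List.count_cons]; omega
      have e4 : List.count b0 (b0 :: B') = List.count b0 B' + 1 := by simp
      have ll1 : (a0 :: A').length = A'.length + 1 := rfl
      have ll2 : (b0 :: B').length = B'.length + 1 := rfl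
      by_cases hQa : ∀ p ∈ A'.zip B', a0 = p.1 ∨ a0 = p.2 <;>
        by_cases hQb : ∀ p ∈ A'.zip B', b0 = p.1 ∨ b0 = p.2
      · have hd1 : decide (∀ p ∈ A'.zip B', a0 = p.1 ∨ a0 = p.2) = true := decide_eq_true hQa
        have hd2 : decide (∀ p ∈ A'.zip B', b0 = p.1 ∨ b0 = p.2) = true := decide_eq_true hQb
        simp only [List.filter_cons, List.filter_nil, hd1, hd2, if_true, List.foldl_cons,
          List.foldl_nil, hca, hcb, hcc, hca', hcb', hcc',
          if_pos (keya.mpr hQa), if_pos (keyb.mpr hQb)]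
        simp only [hfst, hsnd, hcntA, hcntB, hlen']
        norm_num [PySem.Set.len]
        simp only [min_def, max_def]
        split_ifs <;> omega
      · have hd1 : decide (∀ p ∈ A'.zip B', a0 = p.1 ∨ a0 = p.2) = true := decide_eq_true hQa
        have hd2 : decide (∀ p ∈ A'.zip B', b0 = p.1 ∨ b0 = p.2) = false := decide_eq_false hQb
        simp only [List.filter_cons, List.filter_nil, hd1, hd2, if_true,
          List.foldl_cons, List.foldl_nil, hca, hcb, hcc, hca', hcb', hcc',
          if_pos (keya.mpr hQa), if_neg (fun hc => hQb (keyb.mp hc))]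
        simp only [hfst, hsnd, hcntA, hcntB, hlen']
        norm_num [PySem.Set.len]
        omega
      · have hd1 : decide (∀ p ∈ A'.zip B', a0 = p.1 ∨ a0 = p.2) = false := decide_eq_false hQa
        have hd2 : decide (∀ p ∈ A'.zip B', b0 = p.1 ∨ b0 = p.2) = true := decide_eq_true hQb
        simp only [List.filter_cons, List.filter_nil, hd1, hd2, if_true,
          List.foldl_cons, List.foldl_nil, hca, hcb, hcc, hca', hcb', hcc',
          if_neg (fun hc => hQa (keya.mp hc)), if_pos (keyb.mpr hQb)]
        simp only [hfst, hsnd, hcntA, hcntB, hlen']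
        norm_num [PySem.Set.len]
        omega
      · have hd1 : decide (∀ p ∈ A'.zip B', a0 = p.1 ∨ a0 = p.2) = false := decide_eq_false hQa
        have hd2 : decide (∀ p ∈ A'.zip B', b0 = p.1 ∨ b0 = p.2) = false := decide_eq_false hQb
        simp only [List.filter_cons, List.filter_nil, hd1, hd2,
          List.foldl_cons, List.foldl_nil, hca, hcb, hcc, hca', hcb', hcc',
          if_neg (fun hc => hQa (keya.mp hc)), if_neg (fun hc => hQb (keyb.mp hc))]
        simp [PySem.Set.len]
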